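-- pv_equiv track=rewrite | github.com/pisceskibo/AlgorithmDesign | src/Hw7_21000712_TaQuangTung/BT8_CandySplit.py | candy_split
-- ===== SOURCE A (Python) =====
-- def candy_split(candies):
--     n = len(candies)
--     total_sum = sum(candies)
--
--     # Cơ sở quy hoạch động
--     dp = [[False] * (total_sum // 2 + 1) for _ in range(n + 1)]
--     dp[0][0] = True
--     decision = [[False] * (total_sum // 2 + 1) for _ in range(n + 1)]
--
--     # Quy hoạch động
--     for i in range(1, n + 1):
--         for j in range(total_sum // 2 + 1):
--             if j >= candies[i - 1]:
--                 dp[i][j] = dp[i - 1][j] or dp[i - 1][j - candies[i - 1]]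
--                 if dp[i][j] and dp[i - 1][j - candies[i - 1]]:
--                     decision[i][j] = True
--             else:
--                 dp[i][j] = dp[i - 1][j]
--
--     # Tìm nghiệm tối ưu
--     for i in range(total_sum // 2, -1, -1):
--         if dp[n][i]:
--             part1 = i
--             break
--
--     # Truy vết tìm nghiệm
--     part1_candies = []
--     w = part1
--     for i in range(n, 0, -1):
--         if decision[i][w]:
--             part1_candies.append(candies[i - 1])
--             w -= candies[i - 1]
--
--     part2_candies = list(candies)
--     for candy in part1_candies:
--         part2_candies.remove(candy)
--
--     return part1_candies, part2_candies
-- ===== SOURCE B (Python) =====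
-- def candy_split(candies):
--     # 0/1-knapsack value formulation: row[w] = largest subset sum <= w using the
--     # items seen so far (weight = value); no boolean table, no decision table,
--     # no search loop: part1 is read off directly and membership is decided by
--     # an equality test on the stored value rows.
--     cap = sum(candies) // 2
--     row = [0] * (cap + 1)
--     rows = [row]
--     for c in candies:
--         row = [row[w] if w < c else max(row[w], c + row[w - c])
--                for w in range(cap + 1)]
--         rows.append(row)
--     part1_candies = []
--     w = rows[-1][cap]
--     for i in range(len(candies), 0, -1):
--         c = candies[i - 1]
--         if c <= w and rows[i - 1][w - c] == w - c:
--             part1_candies.append(c)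
--             w -= c
--     part2_candies = list(candies)
--     for c in part1_candies:
--         part2_candies.remove(c)
--     return part1_candies, part2_candies
-- ===== Notes on version B (the rewrite author's own statement) =====
-- stated objective: alternative
-- what changed: Replaces A's boolean reachability DP with decision table and downward search loop by a 0/1-knapsack value DP (row[w] = largest subset sum <= w, weight = value): part1 is read directly from the final row and membership in part1 is decided by an equality test rows[i-1][w-c] == w-c on the value rows, with no decision table and no search loop.
import Mathlib
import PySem

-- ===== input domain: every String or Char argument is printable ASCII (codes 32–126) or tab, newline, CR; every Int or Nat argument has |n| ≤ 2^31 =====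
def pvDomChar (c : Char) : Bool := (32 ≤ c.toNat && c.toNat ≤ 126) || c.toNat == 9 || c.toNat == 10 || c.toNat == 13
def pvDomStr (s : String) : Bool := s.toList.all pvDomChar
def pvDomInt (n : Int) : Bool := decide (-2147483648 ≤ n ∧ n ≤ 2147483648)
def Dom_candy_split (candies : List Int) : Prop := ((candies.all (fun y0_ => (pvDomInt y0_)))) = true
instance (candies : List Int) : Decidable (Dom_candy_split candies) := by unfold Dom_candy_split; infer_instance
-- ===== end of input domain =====

-- B replaces A's boolean reachability DP (dp + decision tables + downward search loop)
-- by a 0/1-knapsack value DP (max subset sum <= w per prefix), reading part1 directly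
-- and reconstructing by an equality test on the value rows (objective: alternative).


-- ===== PORT A =====
-- the body of A's inner j-loop: next dp row and the decision row it records
def aRowStep (prev : List Bool) (cap : Nat) (c : Int) : List Bool × List Bool :=
  ((List.range (cap+1)).map (fun (j : Nat) =>
      if c ≤ (j : Int) then
        PySem.List.pyGetD prev (j : Int) false || PySem.List.pyGetD prev ((j : Int) - c) false
      else PySem.List.pyGetD prev (j : Int) false),
   (List.range (cap+1)).map (fun (j : Nat) =>
      if c ≤ (j : Int) then
        (PySem.List.pyGetD prev (j : Int) false || PySem.List.pyGetD prev ((j : Int) - c) false)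
          && PySem.List.pyGetD prev ((j : Int) - c) false
      else false))

def aStep (cap : Nat) (st : List Bool × List (List Bool)) (c : Int) : List Bool × List (List Bool) :=
  ((aRowStep st.1 cap c).1, st.2 ++ [(aRowStep st.1 cap c).2])

-- 'for i in range(cap, -1, -1): if dp[n][i]: part1 = i; break'
-- at i = 0 Python tests dp[n][0]; dp[n][0] is True on every input Pre_ admits
def aSearch (row : List Bool) : Nat → Nat
  | 0 => 0
  | w+1 => if PySem.List.pyGetD row ((w+1 : Nat) : Int) false then w+1 else aSearch row w

-- 'if decision[i][w]: part1_candies.append(candies[i-1]); w -= candies[i-1]'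
def aTrace (st : List Int × Int) (p : Int × List Bool) : List Int × Int :=
  if PySem.List.pyGetD p.2 st.2 false then (st.1 ++ [p.1], st.2 - p.1) else st

def candy_split (candies : List Int) : List Int × List Int :=
  let total_sum := candies.sum
  let cap : Nat := (PySem.Int.floordiv total_sum 2).toNat    -- total_sum // 2 (nonnegative under Pre_)
  let dp0 : List Bool := (List.replicate (cap+1) false).set 0 true   -- dp[0], with dp[0][0] = True
  let dpdec := candies.foldl (aStep cap) (dp0, [])    -- (dp[n], decision rows 1..n)
  let part1 : Nat := aSearch dpdec.1 cap
  let tr := (candies.reverse.zip dpdec.2.reverse).foldl aTrace (([] : List Int), (part1 : Int))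
  let part2 := tr.1.foldl (fun l c => (PySem.List.remove? l c).getD l) candies
  (tr.1, part2)

-- ===== PORT B =====
-- 'row = [row[w] if w < c else max(row[w], c + row[w - c]) for w in range(cap + 1)]'
def bRowStep (prev : List Int) (cap : Nat) (c : Int) : List Int :=
  (List.range (cap+1)).map (fun (w : Nat) =>
    if (w : Int) < c then PySem.List.pyGetD prev (w : Int) 0
    else max (PySem.List.pyGetD prev (w : Int) 0) (c + PySem.List.pyGetD prev ((w : Int) - c) 0))

def bStep (cap : Nat) (st : List (List Int) × List Int) (c : Int) : List (List Int) × List Int :=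
  (st.1 ++ [bRowStep st.2 cap c], bRowStep st.2 cap c)

-- 'if c <= w and rows[i - 1][w - c] == w - c: part1_candies.append(c); w -= c'
def bTrace (st : List Int × Int) (q : Int × List Int) : List Int × Int :=
  if decide (q.1 ≤ st.2) && decide (PySem.List.pyGetD q.2 (st.2 - q.1) 0 = st.2 - q.1)
  then (st.1 ++ [q.1], st.2 - q.1) else st

def candy_split_alt (candies : List Int) : List Int × List Int :=
  let cap : Nat := (PySem.Int.floordiv candies.sum 2).toNat
  let row0 : List Int := List.replicate (cap+1) 0
  let st := candies.foldl (bStep cap) ([row0], row0)   -- (rows, last row)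
  let w0 : Int := PySem.List.pyGetD st.2 (cap : Int) 0   -- w = rows[-1][cap]
  let tr := (candies.reverse.zip st.1.dropLast.reverse).foldl bTrace (([] : List Int), w0)
  let part2 := tr.1.foldl (fun l c => (PySem.List.remove? l c).getD l) candies
  (tr.1, part2)

-- ===== PRECONDITION & SPEC =====
-- Pre_ excludes lists containing a negative value: there A always raises
-- (IndexError: the dp row index j minus a negative candy leaves the row, or the
-- rows are empty on a negative total); B's Python raises IndexError on those lists too.
-- A returns normally on every list of nonnegative ints.
def Pre_candy_split (candies : List Int) : Prop := ∀ c ∈ candies, 0 ≤ c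
instance (candies : List Int) : Decidable (Pre_candy_split candies) := by unfold Pre_candy_split; infer_instance
def pvWitness_candy_split : List Int := ([1, 2, 3, 4, 5])

def Spec_candy_split (candies : List Int) (out : List Int × List Int) : Prop := out = candy_split_alt candies
instance (candies : List Int) (out : List Int × List Int) : Decidable (Spec_candy_split candies out) := by unfold Spec_candy_split; infer_instance

-- ===== CLAIM (what is proved, stated in full; the proofs are below) =====
def Claim_equal_candy_split : Prop := ∀ (candies : List Int), Dom_candy_split candies → Pre_candy_split candies → Spec_candy_split candies (candy_split candies)

-- ===== LEMMAS AND PROOFS =====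

-- value-row ↔ boolean-row correspondence: entry w of the value row is the
-- largest reachable sum ≤ w, which is exactly what A's aSearch computes
def VRel (cap : Nat) (brow : List Bool) (vrow : List Int) : Prop :=
  vrow = (List.range (cap+1)).map (fun w => ((aSearch brow w : Nat) : Int))

-- decision row ↔ value row correspondence for the reconstruction loops
def CondRel (cap : Nat) (p : Int × List Bool) (q : Int × List Int) : Prop :=
  p.1 = q.1 ∧ 0 ≤ p.1 ∧ ∀ w : Int, 0 ≤ w → w ≤ (cap : Int) →
    PySem.List.pyGetD p.2 w false
      = (decide (q.1 ≤ w) && decide (PySem.List.pyGetD q.2 (w - q.1) 0 = w - q.1))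

-- closed characterisations of the two dp folds
def rowsOf (cap : Nat) (prev : List Bool) : List Int → List Bool
  | [] => prev
  | c :: cs => rowsOf cap (aRowStep prev cap c).1 cs

def decsOf (cap : Nat) (prev : List Bool) : List Int → List (List Bool)
  | [] => []
  | c :: cs => (aRowStep prev cap c).2 :: decsOf cap (aRowStep prev cap c).1 cs

def vFin (cap : Nat) (v : List Int) : List Int → List Int
  | [] => v
  | c :: cs => vFin cap (bRowStep v cap c) cs

def vRowsOf (cap : Nat) (v : List Int) : List Int → List (List Int)
  | [] => []
  | c :: cs => bRowStep v cap c :: vRowsOf cap (bRowStep v cap c) cs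

def vPrevOf (cap : Nat) (v : List Int) : List Int → List (List Int)
  | [] => []
  | c :: cs => v :: vPrevOf cap (bRowStep v cap c) cs

theorem foldA_eq (cap : Nat) : ∀ (cs : List Int) (prev : List Bool) (decs : List (List Bool)),
    cs.foldl (aStep cap) (prev, decs) = (rowsOf cap prev cs, decs ++ decsOf cap prev cs) := by
  intro cs
  induction cs with
  | nil => intro prev decs; simp [rowsOf, decsOf]
  | cons c cs ih => intro prev decs; simp [List.foldl_cons, aStep, rowsOf, decsOf, ih]

theorem foldB_eq (cap : Nat) : ∀ (cs : List Int) (rows : List (List Int)) (v : List Int),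
    cs.foldl (bStep cap) (rows, v) = (rows ++ vRowsOf cap v cs, vFin cap v cs) := by
  intro cs
  induction cs with
  | nil => intro rows v; simp [vRowsOf, vFin]
  | cons c cs ih => intro rows v; simp [List.foldl_cons, bStep, vRowsOf, vFin, ih]

theorem cons_vRowsOf (cap : Nat) : ∀ (cs : List Int) (v : List Int),
    v :: vRowsOf cap v cs = vPrevOf cap v cs ++ [vFin cap v cs] := by
  intro cs
  induction cs with
  | nil => intro v; simp [vRowsOf, vPrevOf, vFin]
  | cons c cs ih => intro v; simp [vRowsOf, vPrevOf, vFin, ih]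

theorem length_decsOf (cap : Nat) : ∀ (cs : List Int) (prev : List Bool),
    (decsOf cap prev cs).length = cs.length := by
  intro cs
  induction cs with
  | nil => intro prev; simp [decsOf]
  | cons c cs ih => intro prev; simp [decsOf, ih]

theorem length_vPrevOf (cap : Nat) : ∀ (cs : List Int) (v : List Int),
    (vPrevOf cap v cs).length = cs.length := by
  intro cs
  induction cs with
  | nil => intro v; simp [vPrevOf]
  | cons c cs ih => intro v; simp [vPrevOf, ih]

-- entry of A's next dp row at a Nat index within the row
theorem newb_entry (cap : Nat) (brow : List Bool) (c : Int) (w : Nat) (hw : w ≤ cap) :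
    PySem.List.pyGetD (aRowStep brow cap c).1 ((w : Nat) : Int) false =
      (if c ≤ (w : Int) then
        PySem.List.pyGetD brow (w : Int) false || PySem.List.pyGetD brow ((w : Int) - c) false
      else PySem.List.pyGetD brow (w : Int) false) := by
  simp only [aRowStep]
  rw [PySem.List.pyGetD_of_nonneg _ _ (by omega)]
  rw [PySem.List.getD_map_range _ _ _ _ (by omega)]
  simp

-- properties of aSearch = "largest index ≤ w whose entry is true (0 as floor)"
theorem aSearch_le (row : List Bool) : ∀ w : Nat, aSearch row w ≤ w := by
  intro w
  induction w with
  | zero => simp [aSearch]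
  | succ w ih =>
    rw [aSearch]
    split
    · omega
    · exact Nat.le_trans ih (by omega)

theorem aSearch_mem (row : List Bool) (h0 : PySem.List.pyGetD row (0 : Int) false = true) :
    ∀ w : Nat, PySem.List.pyGetD row ((aSearch row w : Nat) : Int) false = true := by
  intro w
  induction w with
  | zero => simpa [aSearch] using h0
  | succ w ih =>
    rw [aSearch]
    split
    · assumption
    · exact ih

theorem aSearch_max (row : List Bool) : ∀ (w s : Nat), s ≤ w →
    PySem.List.pyGetD row ((s : Nat) : Int) false = true → s ≤ aSearch row w := by
  intro w
  induction w with
  | zero => intro s hs _; omega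
  | succ w ih =>
    intro s hs hmem
    rw [aSearch]
    split
    · exact hs
    · rename_i hcond
      have hne : s ≠ w + 1 := by
        intro h; subst h; exact hcond hmem
      exact Nat.le_trans (ih s (by omega) hmem) (by omega)

theorem aSearch_unique (row : List Bool) (h0 : PySem.List.pyGetD row (0 : Int) false = true)
    {w m : Nat} (hm : m ≤ w) (hmem : PySem.List.pyGetD row ((m : Nat) : Int) false = true)
    (hmax : ∀ s : Nat, s ≤ w → PySem.List.pyGetD row ((s : Nat) : Int) false = true → s ≤ m) :
    aSearch row w = m :=
  Nat.le_antisymm (hmax _ (aSearch_le row w) (aSearch_mem row h0 w)) (aSearch_max row w m hm hmem)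

theorem aSearch_eq_iff (row : List Bool) (h0 : PySem.List.pyGetD row (0 : Int) false = true)
    (k : Nat) : aSearch row k = k ↔ PySem.List.pyGetD row ((k : Nat) : Int) false = true := by
  cases k with
  | zero => simpa [aSearch] using h0
  | succ k =>
    rw [aSearch]
    constructor
    · intro h
      split at h
      · assumption
      · have := aSearch_le row k; omega
    · intro hmem; rw [if_pos hmem]

-- the initial dp row dp[0]
theorem dp0_entry (cap : Nat) (w : Nat) (hw : w ≤ cap) :
    PySem.List.pyGetD ((List.replicate (cap+1) false).set 0 true) ((w : Nat) : Int) false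
      = decide (w = 0) := by
  rw [PySem.List.pyGetD_of_nonneg _ _ (by omega)]
  simp only [Int.toNat_natCast]
  rcases Nat.eq_zero_or_pos w with h | h
  · subst h; simp
  · rw [List.getD_eq_getElem?_getD, List.getElem?_set_ne (by omega), List.getElem?_replicate,
      if_pos (by omega)]
    simp [show w ≠ 0 by omega]

theorem aSearch_dp0 (cap : Nat) : ∀ w : Nat, w ≤ cap →
    aSearch ((List.replicate (cap+1) false).set 0 true) w = 0 := by
  intro w
  induction w with
  | zero => intro _; rfl
  | succ w ih =>
    intro hw
    rw [aSearch, dp0_entry cap (w+1) hw]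
    simp only [decide_eq_true_eq]
    rw [if_neg (by omega)]
    exact ih (by omega)

theorem vrel_init (cap : Nat) :
    VRel cap ((List.replicate (cap+1) false).set 0 true) (List.replicate (cap+1) 0) := by
  unfold VRel
  apply List.ext_getElem
  · simp
  · intro j h1 h2
    simp only [List.getElem_replicate, List.getElem_map, List.getElem_range]
    simp at h2
    rw [aSearch_dp0 cap j (by omega)]
    simp

-- reading a value row through VRel
theorem vrow_get {cap : Nat} {brow : List Bool} {vrow : List Int} (hv : VRel cap brow vrow)
    (x : Int) (h0x : 0 ≤ x) (hx : x ≤ (cap : Int)) :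
    PySem.List.pyGetD vrow x 0 = ((aSearch brow x.toNat : Nat) : Int) := by
  subst hv
  rw [PySem.List.pyGetD_of_nonneg _ _ h0x]
  rw [PySem.List.getD_map_range _ _ _ _ (by omega)]

-- dp[i][0] stays True
theorem h0_step {cap : Nat} (brow : List Bool)
    (h0 : PySem.List.pyGetD brow (0 : Int) false = true) {c : Int} (hc : 0 ≤ c) :
    PySem.List.pyGetD (aRowStep brow cap c).1 (0 : Int) false = true := by
  have h := newb_entry cap brow c 0 (by omega)
  simp only [Nat.cast_zero] at h
  rw [h]
  split_ifs with hcz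
  · have hc0 : c = 0 := le_antisymm hcz hc
    subst hc0
    simp [h0]
  · exact h0

-- the key step: the max reachable sum ≤ w after adding item c
theorem aSearch_step {cap : Nat} {brow : List Bool}
    (h0 : PySem.List.pyGetD brow (0 : Int) false = true) {c : Int} (hc : 0 ≤ c)
    {w : Nat} (hw : w ≤ cap) :
    ((aSearch (aRowStep brow cap c).1 w : Nat) : Int) =
      if (w : Int) < c then ((aSearch brow w : Nat) : Int)
      else max ((aSearch brow w : Nat) : Int) (c + ((aSearch brow ((w : Int) - c).toNat : Nat) : Int)) := by
  have h0new := h0_step (cap := cap) brow h0 hc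
  by_cases hlt : (w : Int) < c
  · rw [if_pos hlt]
    have heq : aSearch (aRowStep brow cap c).1 w = aSearch brow w := by
      apply aSearch_unique _ h0new (aSearch_le brow w)
      · rw [newb_entry cap brow c _ (le_trans (aSearch_le brow w) hw)]
        have h1 : ((aSearch brow w : Nat) : Int) ≤ (w : Int) := by
          exact_mod_cast aSearch_le brow w
        rw [if_neg (by omega)]
        exact aSearch_mem brow h0 w
      · intro s hs hmem
        rw [newb_entry cap brow c s (le_trans hs hw)] at hmem
        have h1 : ((s : Nat) : Int) ≤ (w : Int) := by exact_mod_cast hs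
        rw [if_neg (by omega)] at hmem
        exact aSearch_max brow w s hs hmem
    exact_mod_cast congrArg (fun n => ((n : Nat) : Int)) heq
  · rw [if_neg hlt]
    have hcw : c ≤ (w : Int) := by omega
    set k : Nat := ((w : Int) - c).toNat with hkdef
    have hck : (k : Int) = (w : Int) - c := by omega
    have hct : ((c.toNat : Nat) : Int) = c := Int.toNat_of_nonneg hc
    have hkc : k + c.toNat = w := by omega
    set a1 := aSearch brow w with ha1def
    set a2 := aSearch brow k with ha2def
    have ha1 : a1 ≤ w := aSearch_le brow w
    have ha2 : a2 ≤ k := aSearch_le brow k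
    have heq : aSearch (aRowStep brow cap c).1 w = max a1 (c.toNat + a2) := by
      apply aSearch_unique _ h0new (by omega)
      · rw [newb_entry cap brow c _ (by omega)]
        rcases Nat.le_total (c.toNat + a2) a1 with hcase | hcase
        · rw [Nat.max_eq_left hcase]
          split_ifs with hcs
          · rw [aSearch_mem brow h0 w]; simp
          · exact aSearch_mem brow h0 w
        · rw [Nat.max_eq_right hcase]
          have hcle : c ≤ ((c.toNat + a2 : Nat) : Int) := by push_cast; omega
          rw [if_pos hcle]
          have hidx : ((c.toNat + a2 : Nat) : Int) - c = ((a2 : Nat) : Int) := by push_cast; omega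
          rw [hidx, aSearch_mem brow h0 k]
          simp
      · intro s hs hmem
        rw [newb_entry cap brow c s (le_trans hs hw)] at hmem
        split_ifs at hmem with hcs
        · rcases Bool.or_eq_true_iff.mp hmem with h | h
          · have := aSearch_max brow w s hs h; omega
          · have hsc : (((s - c.toNat : Nat) : Nat) : Int) = (s : Int) - c := by omega
            rw [← hsc] at h
            have hskk : s - c.toNat ≤ k := by omega
            have := aSearch_max brow k _ hskk h
            omega
        · have := aSearch_max brow w s hs hmem; omega
    rw [heq]
    push_cast [hct]
    rfl

theorem vrel_step {cap : Nat} {brow : List Bool} {vrow : List Int}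
    (h0 : PySem.List.pyGetD brow (0 : Int) false = true) {c : Int} (hc : 0 ≤ c)
    (hv : VRel cap brow vrow) :
    VRel cap (aRowStep brow cap c).1 (bRowStep vrow cap c) := by
  unfold VRel bRowStep
  apply List.map_congr_left
  intro w hwmem
  simp only [List.mem_range] at hwmem
  have hw : w ≤ cap := by omega
  rw [aSearch_step (cap := cap) h0 hc hw]
  by_cases hlt : (w : Int) < c
  · rw [if_pos hlt, if_pos hlt]
    rw [vrow_get hv (w : Int) (by omega) (by omega)]
    simp
  · rw [if_neg hlt, if_neg hlt]
    rw [vrow_get hv (w : Int) (by omega) (by omega)]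
    rw [vrow_get hv ((w : Int) - c) (by omega) (by omega)]
    simp

theorem condrel_step {cap : Nat} {brow : List Bool} {vrow : List Int}
    (h0 : PySem.List.pyGetD brow (0 : Int) false = true) {c : Int} (hc : 0 ≤ c)
    (hv : VRel cap brow vrow) :
    CondRel cap (c, (aRowStep brow cap c).2) (c, vrow) := by
  refine ⟨rfl, hc, ?_⟩
  intro w hw0 hwcap
  simp only [aRowStep]
  rw [PySem.List.pyGetD_of_nonneg _ _ hw0]
  rw [PySem.List.getD_map_range _ _ _ _ (by omega)]
  have hwn : ((w.toNat : Nat) : Int) = w := by omega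
  rw [hwn]
  by_cases hcw : c ≤ w
  · rw [if_pos hcw]
    rw [vrow_get hv (w - c) (by omega) (by omega)]
    have hd : decide (c ≤ w) = true := by simp [hcw]
    rw [hd, Bool.true_and]
    have hk : (((w - c).toNat : Nat) : Int) = w - c := by omega
    have hiff : (((aSearch brow (w - c).toNat : Nat) : Int) = w - c) ↔
        PySem.List.pyGetD brow (w - c) false = true := by
      rw [← hk, Int.natCast_inj]
      exact aSearch_eq_iff brow h0 (w - c).toNat
    cases hb : PySem.List.pyGetD brow (w - c) false
    · have hnP : ¬ (((aSearch brow (w - c).toNat : Nat) : Int) = w - c) := by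
        intro h; rw [hiff.mp h] at hb; cases hb
      simp [hnP]
    · have hP := hiff.mpr hb
      simp [hP]
  · rw [if_neg hcw]
    have hd : decide (c ≤ w) = false := by simp [hcw]
    rw [hd, Bool.false_and]

-- the invariant carried along the whole fold
theorem inv_fin (cap : Nat) : ∀ (cs : List Int) (brow : List Bool) (vrow : List Int),
    (∀ c ∈ cs, 0 ≤ c) → PySem.List.pyGetD brow (0 : Int) false = true → VRel cap brow vrow →
    PySem.List.pyGetD (rowsOf cap brow cs) (0 : Int) false = true ∧
      VRel cap (rowsOf cap brow cs) (vFin cap vrow cs) := by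
  intro cs
  induction cs with
  | nil => intro brow vrow _ h0 hv; exact ⟨h0, hv⟩
  | cons c cs ih =>
    intro brow vrow hnn h0 hv
    exact ih _ _ (fun x hx => hnn x (List.mem_cons_of_mem _ hx))
      (h0_step brow h0 (hnn c List.mem_cons_self))
      (vrel_step h0 (hnn c List.mem_cons_self) hv)

theorem forall2_zip (cap : Nat) : ∀ (cs : List Int) (brow : List Bool) (vrow : List Int),
    (∀ c ∈ cs, 0 ≤ c) → PySem.List.pyGetD brow (0 : Int) false = true → VRel cap brow vrow →
    List.Forall₂ (CondRel cap) (cs.zip (decsOf cap brow cs)) (cs.zip (vPrevOf cap vrow cs)) := by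
  intro cs
  induction cs with
  | nil => intro brow vrow _ _ _; simp [decsOf, vPrevOf]
  | cons c cs ih =>
    intro brow vrow hnn h0 hv
    simp only [decsOf, vPrevOf, List.zip_cons_cons]
    exact List.Forall₂.cons (condrel_step h0 (hnn c List.mem_cons_self) hv)
      (ih _ _ (fun x hx => hnn x (List.mem_cons_of_mem _ hx))
        (h0_step brow h0 (hnn c List.mem_cons_self))
        (vrel_step h0 (hnn c List.mem_cons_self) hv))

theorem trace_eq (cap : Nat) : ∀ (ps : List (Int × List Bool)) (qs : List (Int × List Int)),
    List.Forall₂ (CondRel cap) ps qs → ∀ (acc : List Int) (w : Int), 0 ≤ w → w ≤ (cap : Int) →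
    ps.foldl aTrace (acc, w) = qs.foldl bTrace (acc, w) := by
  intro ps qs h
  induction h with
  | nil => intro acc w h0 hcap; rfl
  | @cons p q ps qs hpq htl ih =>
    intro acc w h0 hcap
    obtain ⟨h1, hc0, hcond⟩ := hpq
    simp only [List.foldl_cons, aTrace, bTrace]
    rw [hcond w h0 hcap, h1]
    by_cases hb : (decide (q.1 ≤ w) &&
        decide (PySem.List.pyGetD q.2 (w - q.1) 0 = w - q.1)) = true
    · have hq : q.1 ≤ w := by simpa using ((Bool.and_eq_true _ _).mp hb).1
      have hq0 : 0 ≤ q.1 := h1 ▸ hc0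
      simp only [if_pos hb]
      exact ih (acc ++ [q.1]) (w - q.1) (by omega) (by omega)
    · simp only [if_neg hb]
      exact ih acc w h0 hcap

-- ===== VERDICT (by name: the statement is the Claim_ definition above) =====
theorem candy_split_spec : Claim_equal_candy_split := by
  intro candies _hdom hpre
  unfold Spec_candy_split
  unfold candy_split candy_split_alt
  simp only [foldA_eq, foldB_eq, List.nil_append]
  set cap : Nat := (PySem.Int.floordiv candies.sum 2).toNat with hcapdef
  have h0init : PySem.List.pyGetD ((List.replicate (cap+1) false).set 0 true) (0 : Int) false = true := by
    simpa using dp0_entry cap 0 (by omega)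
  have hvinit := vrel_init cap
  obtain ⟨h0fin, hvfin⟩ := inv_fin cap candies _ _ hpre h0init hvinit
  -- B's initial w equals A's part1
  have hw0 : PySem.List.pyGetD (vFin cap (List.replicate (cap+1) 0) candies) ((cap : Nat) : Int) 0
      = ((aSearch (rowsOf cap ((List.replicate (cap+1) false).set 0 true) candies) cap : Nat) : Int) := by
    rw [vrow_get hvfin ((cap : Nat) : Int) (by omega) (by omega)]
    simp
  -- rows[:-1] are the prefix value rows
  have hdrop : ((([List.replicate (cap+1) 0] ++ vRowsOf cap (List.replicate (cap+1) 0) candies) : List (List Int))).dropLast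
      = vPrevOf cap (List.replicate (cap+1) 0) candies := by
    have := cons_vRowsOf cap candies (List.replicate (cap+1) 0)
    simp only [List.singleton_append, this, List.dropLast_concat]
  rw [hdrop, hw0]
  -- the two reconstruction folds agree
  have hf2 := forall2_zip cap candies _ _ hpre h0init hvinit
  have hrev1 : candies.reverse.zip (decsOf cap ((List.replicate (cap+1) false).set 0 true) candies).reverse
      = (candies.zip (decsOf cap ((List.replicate (cap+1) false).set 0 true) candies)).reverse := by
    simp only [List.zip_eq_zipWith]
    exact (List.reverse_zipWith (by simp [length_decsOf])).symm
  have hrev2 : candies.reverse.zip (vPrevOf cap (List.replicate (cap+1) 0) candies).reverse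
      = (candies.zip (vPrevOf cap (List.replicate (cap+1) 0) candies)).reverse := by
    simp only [List.zip_eq_zipWith]
    exact (List.reverse_zipWith (by simp [length_vPrevOf])).symm
  rw [hrev1, hrev2]
  have htr := trace_eq cap _ _ (List.forall₂_reverse_iff.mpr hf2)
    [] ((aSearch (rowsOf cap ((List.replicate (cap+1) false).set 0 true) candies) cap : Nat) : Int)
    (by positivity)
    (by exact_mod_cast aSearch_le _ cap)
  rw [htr]
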